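-- pv_equiv track=rewrite | github.com/openlmi/openlmi-scripts | commands/software/lmi/scripts/software/__init__.py | render_failed_flags
-- ===== SOURCE A (Python) =====
-- def render_failed_flags(failed_flags):
--     """
--     Make one liner string representing failed flags list of file that did not
--     pass the verification.
--
--     :param list failed_flags: Value of ``FailedFlags`` property
--         of some ``LMI_SoftwareIdentityFileCheck``.
--     :returns: Verification string with format matching the output of ``rpm -V``
--         command.
--     :rtype: string
--     """
--     if 0 in failed_flags:
--         return 'missing'
--     result = []
--     for _name, letter, flag_num in (
--                 ('file size',     'S', 1),
--                 ('file mode',     'M', 2),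
--                 ('digest',        '5', 3),
--                 ('device number', 'D', 4),
--                 ('link target',   'L', 5),
--                 ('user id',       'U', 6),
--                 ('group id',      'G', 7),
--                 ('last modification time', 'T', 8),
--                 ('capabilities', 'P', -1)   # not yet supported by provider
--             ):
--         if flag_num in failed_flags:
--             result.append(letter)
--         else:
--             result.append('.')
--     return ''.join(result)
-- ===== SOURCE B (Python) =====
-- SLOTS = {1: (0, 'S'), 2: (1, 'M'), 3: (2, '5'), 4: (3, 'D'), 5: (4, 'L'),
--          6: (5, 'U'), 7: (6, 'G'), 8: (7, 'T'), -1: (8, 'P')}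
--
--
-- def render_failed_flags(failed_flags):
--     result = ['.'] * 9
--     for flag in failed_flags:
--         if flag == 0:
--             return 'missing'
--         slot = SLOTS.get(flag)
--         if slot is not None:
--             result[slot[0]] = slot[1]
--     return ''.join(result)
-- ===== Notes on version B (the rewrite author's own statement) =====
-- stated objective: alternative
-- what changed: B scatters each input flag once into a preallocated 9-slot array via a flag->(index,letter) dict (short-circuiting to 'missing' on 0), instead of A's gather that scans the whole input list once per table row.
import Mathlib
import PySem

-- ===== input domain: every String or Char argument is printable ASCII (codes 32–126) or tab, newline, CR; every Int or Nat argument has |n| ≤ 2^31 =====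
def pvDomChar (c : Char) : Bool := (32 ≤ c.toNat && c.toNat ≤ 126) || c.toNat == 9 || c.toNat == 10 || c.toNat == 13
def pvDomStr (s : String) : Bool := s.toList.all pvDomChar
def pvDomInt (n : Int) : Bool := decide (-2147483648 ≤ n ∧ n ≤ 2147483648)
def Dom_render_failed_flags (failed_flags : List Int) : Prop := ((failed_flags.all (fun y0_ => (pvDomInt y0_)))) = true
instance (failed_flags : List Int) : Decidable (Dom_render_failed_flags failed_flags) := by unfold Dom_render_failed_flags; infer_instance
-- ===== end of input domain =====

-- B scatters flags once into a preallocated 9-slot array via a flag->(index,letter) map; A gathers by scanning the list per table row. Same return values; alternative decomposition.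


-- ===== PORT A =====
-- the literal table of A's for-loop: (name, letter, flag_num)
def pvTableA : List (String × Char × Int) :=
  [("file size", 'S', 1), ("file mode", 'M', 2), ("digest", '5', 3),
   ("device number", 'D', 4), ("link target", 'L', 5), ("user id", 'U', 6),
   ("group id", 'G', 7), ("last modification time", 'T', 8), ("capabilities", 'P', -1)]

def render_failed_flags (failed_flags : List Int) : String :=
  if (0 : Int) ∈ failed_flags then "missing"
  else
    String.mk (pvTableA.foldl
      (fun result t => result ++ [if t.2.2 ∈ failed_flags then t.2.1 else '.']) [])

-- ===== PORT B =====
-- SLOTS.get(flag)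
def pvSlots (f : Int) : Option (Nat × Char) :=
  if f = 1 then some (0, 'S') else if f = 2 then some (1, 'M')
  else if f = 3 then some (2, '5') else if f = 4 then some (3, 'D')
  else if f = 5 then some (4, 'L') else if f = 6 then some (5, 'U')
  else if f = 7 then some (6, 'G') else if f = 8 then some (7, 'T')
  else if f = -1 then some (8, 'P') else none

-- one loop-body step: result[slot[0]] = slot[1] when the flag has a slot
def pvScatter (result : List Char) (f : Int) : List Char :=
  match pvSlots f with
  | none => result
  | some (i, c) => result.set i c

-- the for-loop with its early return on flag == 0
def pvLoopB : List Int → List Char → String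
  | [], result => String.mk result
  | f :: rest, result =>
      if f = 0 then "missing" else pvLoopB rest (pvScatter result f)

def render_failed_flags_alt (failed_flags : List Int) : String :=
  pvLoopB failed_flags ['.', '.', '.', '.', '.', '.', '.', '.', '.']

-- ===== PRECONDITION & SPEC =====
def Spec_render_failed_flags (failed_flags : List Int) (out : String) : Prop := out = render_failed_flags_alt failed_flags
instance (failed_flags : List Int) (out : String) : Decidable (Spec_render_failed_flags failed_flags out) := by unfold Spec_render_failed_flags; infer_instance

-- ===== CLAIM (what is proved, stated in full; the proofs are below) =====
def Claim_equal_render_failed_flags : Prop := ∀ (failed_flags : List Int), Dom_render_failed_flags failed_flags → Spec_render_failed_flags failed_flags (render_failed_flags failed_flags)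

-- ===== LEMMAS AND PROOFS =====

lemma pvScatter_length (result : List Char) (f : Int) :
    (pvScatter result f).length = result.length := by
  unfold pvScatter; cases h : pvSlots f with
  | none => rfl
  | some v => cases v; simp

lemma pvLoopB_eq_foldl (xs : List Int) :
    ∀ result : List Char,
      pvLoopB xs result =
        if (0 : Int) ∈ xs then "missing" else String.mk (xs.foldl pvScatter result) := by
  induction xs with
  | nil => intro result; simp [pvLoopB]
  | cons f rest ih =>
    intro result
    by_cases hf : f = 0
    · subst hf; simp [pvLoopB]
    · simp [pvLoopB, hf, ih, List.mem_cons, Ne.symm hf]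

def pvSlotFlag (i : Nat) : Int := ([1, 2, 3, 4, 5, 6, 7, 8, -1] : List Int).getD i 0

lemma pvSlots_flag_eq {f : Int} {i : Nat} {c : Char}
    (h : pvSlots f = some (i, c)) : f = pvSlotFlag i := by
  unfold pvSlots at h
  split_ifs at h <;> simp_all [pvSlotFlag] <;> (obtain ⟨hi, -⟩ := h; subst hi; rfl)

lemma pvSlots_inj {f g : Int} {i : Nat} {c c' : Char}
    (hf : pvSlots f = some (i, c)) (hg : pvSlots g = some (i, c')) : f = g := by
  rw [pvSlots_flag_eq hf, pvSlots_flag_eq hg]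

lemma foldl_pvScatter_getElem? (xs : List Int) {flag : Int} {i : Nat} {letter : Char}
    (hm : pvSlots flag = some (i, letter)) :
    ∀ result : List Char, i < result.length →
      (xs.foldl pvScatter result)[i]? =
        if flag ∈ xs then some letter else result[i]? := by
  induction xs with
  | nil => intro result _; simp
  | cons f rest ih =>
    intro result hi
    have hi' : i < (pvScatter result f).length := by rw [pvScatter_length]; exact hi
    by_cases hf : f = flag
    · subst hf
      have hstep : (pvScatter result f)[i]? = some letter := by
        unfold pvScatter; rw [hm]
        simp [hi]
      rw [List.foldl_cons, ih _ hi', hstep]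
      simp
    · have hstep : (pvScatter result f)[i]? = result[i]? := by
        unfold pvScatter
        cases h : pvSlots f with
        | none => rfl
        | some v =>
          obtain ⟨j, c⟩ := v
          have hj : j ≠ i := fun hji => hf (pvSlots_inj (hji ▸ h) hm)
          simp [hj]
      rw [List.foldl_cons, ih _ hi', hstep]
      have hne : flag ≠ f := Ne.symm hf
      simp [List.mem_cons, hne]

lemma foldl_pvScatter_length (xs : List Int) :
    ∀ result : List Char, (xs.foldl pvScatter result).length = result.length := by
  induction xs with
  | nil => intro result; rfl
  | cons f rest ih => intro result; rw [List.foldl_cons, ih, pvScatter_length]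

lemma scattered_list_eq (xs : List Int) :
    xs.foldl pvScatter ['.', '.', '.', '.', '.', '.', '.', '.', '.'] =
      [if (1 : Int) ∈ xs then 'S' else '.', if (2 : Int) ∈ xs then 'M' else '.',
       if (3 : Int) ∈ xs then '5' else '.', if (4 : Int) ∈ xs then 'D' else '.',
       if (5 : Int) ∈ xs then 'L' else '.', if (6 : Int) ∈ xs then 'U' else '.',
       if (7 : Int) ∈ xs then 'G' else '.', if (8 : Int) ∈ xs then 'T' else '.',
       if (-1 : Int) ∈ xs then 'P' else '.'] := by
  apply List.ext_getElem?
  intro i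
  by_cases hi : i < 9
  · interval_cases i
    · rw [foldl_pvScatter_getElem? (flag := 1) (letter := 'S') xs (by decide) _ (by simp)]
      by_cases h : ((1 : Int)) ∈ xs <;> simp [h]
    · rw [foldl_pvScatter_getElem? (flag := 2) (letter := 'M') xs (by decide) _ (by simp)]
      by_cases h : ((2 : Int)) ∈ xs <;> simp [h]
    · rw [foldl_pvScatter_getElem? (flag := 3) (letter := '5') xs (by decide) _ (by simp)]
      by_cases h : ((3 : Int)) ∈ xs <;> simp [h]
    · rw [foldl_pvScatter_getElem? (flag := 4) (letter := 'D') xs (by decide) _ (by simp)]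
      by_cases h : ((4 : Int)) ∈ xs <;> simp [h]
    · rw [foldl_pvScatter_getElem? (flag := 5) (letter := 'L') xs (by decide) _ (by simp)]
      by_cases h : ((5 : Int)) ∈ xs <;> simp [h]
    · rw [foldl_pvScatter_getElem? (flag := 6) (letter := 'U') xs (by decide) _ (by simp)]
      by_cases h : ((6 : Int)) ∈ xs <;> simp [h]
    · rw [foldl_pvScatter_getElem? (flag := 7) (letter := 'G') xs (by decide) _ (by simp)]
      by_cases h : ((7 : Int)) ∈ xs <;> simp [h]
    · rw [foldl_pvScatter_getElem? (flag := 8) (letter := 'T') xs (by decide) _ (by simp)]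
      by_cases h : ((8 : Int)) ∈ xs <;> simp [h]
    · rw [foldl_pvScatter_getElem? (flag := -1) (letter := 'P') xs (by decide) _ (by simp)]
      by_cases h : ((-1 : Int)) ∈ xs <;> simp [h]
  · have h1 : (xs.foldl pvScatter ['.', '.', '.', '.', '.', '.', '.', '.', '.'])[i]? = none := by
      apply List.getElem?_eq_none
      rw [foldl_pvScatter_length]; simpa using Nat.le_of_not_lt hi
    have h2 : ([if (1 : Int) ∈ xs then 'S' else '.', if (2 : Int) ∈ xs then 'M' else '.',
       if (3 : Int) ∈ xs then '5' else '.', if (4 : Int) ∈ xs then 'D' else '.',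
       if (5 : Int) ∈ xs then 'L' else '.', if (6 : Int) ∈ xs then 'U' else '.',
       if (7 : Int) ∈ xs then 'G' else '.', if (8 : Int) ∈ xs then 'T' else '.',
       if (-1 : Int) ∈ xs then 'P' else '.'] : List Char)[i]? = none := by
      apply List.getElem?_eq_none; simpa using Nat.le_of_not_lt hi
    rw [h1, h2]

-- ===== VERDICT (by name: the statement is the Claim_ definition above) =====
theorem render_failed_flags_spec : Claim_equal_render_failed_flags := by
  intro xs _
  unfold Spec_render_failed_flags render_failed_flags render_failed_flags_alt
  rw [pvLoopB_eq_foldl]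
  by_cases h0 : (0 : Int) ∈ xs
  · simp [h0]
  · simp only [h0, if_false, scattered_list_eq, pvTableA, List.foldl_cons, List.foldl_nil]
    rfl
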